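-- pv_equiv track=rewrite | github.com/super30admin/Binary-Search-4 | 350_IntersectionOfTwoArraysII.py | intersect1
-- ===== SOURCE A (Python) =====
-- def intersect1(nums1, nums2):
--     res = []
--     # sorting since leetcode input is not sorted
--     nums1.sort()
--     nums2.sort()
--     p1, p2 = 0, 0
--     # traverse until one of our pointer reaches the end.
--     while p1 < len(nums1) and p2 < len(nums2):
--         if nums1[p1] < nums2[p2]:
--             p1 += 1
--         elif nums2[p2] < nums1[p1]:
--             p2 += 1
--         # if the elements are equal
--         else:
--             res.append(nums1[p1])
--             p1 += 1
--             p2 += 1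
--
--     return res
-- ===== SOURCE B (Python) =====
-- def intersect1(nums1, nums2):
--     # keep the in-place sorts so argument mutation matches A's
--     nums1.sort()
--     nums2.sort()
--     pool = {}
--     for y in nums2:
--         pool[y] = pool.get(y, 0) + 1
--     res = []
--     for x in nums1:
--         if pool.get(x, 0) > 0:
--             res.append(x)
--             pool[x] = pool[x] - 1
--     return res
-- ===== Notes on version B (the rewrite author's own statement) =====
-- stated objective: alternative
-- what changed: Replaces the two-pointer merge over the two sorted arrays with a frequency dict built from nums2 in one pass, against which a single loop over sorted nums1 matches and decrements; the sorts are kept so mutation and output order match A's.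
import Mathlib
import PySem

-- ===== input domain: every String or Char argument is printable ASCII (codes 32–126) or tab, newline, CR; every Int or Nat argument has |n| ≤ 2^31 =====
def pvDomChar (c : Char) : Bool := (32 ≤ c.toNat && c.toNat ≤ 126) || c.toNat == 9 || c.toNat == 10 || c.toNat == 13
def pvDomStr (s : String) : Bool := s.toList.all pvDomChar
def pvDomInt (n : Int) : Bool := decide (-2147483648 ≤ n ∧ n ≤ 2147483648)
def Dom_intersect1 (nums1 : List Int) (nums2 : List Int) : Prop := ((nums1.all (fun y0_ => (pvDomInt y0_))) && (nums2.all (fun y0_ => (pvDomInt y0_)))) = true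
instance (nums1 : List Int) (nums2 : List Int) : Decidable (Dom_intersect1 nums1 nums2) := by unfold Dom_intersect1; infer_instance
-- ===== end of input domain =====

-- B replaces A's two-pointer merge with a frequency-dict pass over sorted nums2 matched by one loop over sorted nums1 (alternative, same cost; both Pythons sort their arguments in place, equivalence is about the return value).


-- ===== PORT A =====
-- A: sort both, then a two-pointer merge; the while loop over (p1, p2) becomes
-- structural recursion over the two remaining suffixes (both pointers only advance).
def mergeA : List Int → List Int → List Int
  | x :: a, y :: b =>
      if x < y then mergeA a (y :: b)
      else if y < x then mergeA (x :: a) b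
      else x :: mergeA a b
  | _, _ => []
termination_by a b => a.length + b.length

def intersect1 (nums1 : List Int) (nums2 : List Int) : List Int :=
  mergeA (PySem.List.sorted nums1 (fun x => x) false) (PySem.List.sorted nums2 (fun x => x) false)

-- ===== PORT B =====
-- B: build a frequency dict from sorted nums2 (pool[y] = pool.get(y,0)+1 is Dict.modify),
-- then one loop over sorted nums1 matching against the pool and decrementing.
def loopC : List Int → PySem.Dict Int Int → List Int
  | [], _ => []
  | x :: a, pool =>
      if pool.getD x 0 > 0 then
        x :: loopC a (pool.insert x (pool.getD x 0 - 1))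
      else loopC a pool

def intersect1_alt (nums1 : List Int) (nums2 : List Int) : List Int :=
  loopC (PySem.List.sorted nums1 (fun x => x) false)
    ((PySem.List.sorted nums2 (fun x => x) false).foldl
      (fun d y => d.modify y 0 (· + 1)) PySem.Dict.empty)

-- ===== PRECONDITION & SPEC =====
def Spec_intersect1 (nums1 : List Int) (nums2 : List Int) (out : List Int) : Prop := out = intersect1_alt nums1 nums2
instance (nums1 : List Int) (nums2 : List Int) (out : List Int) : Decidable (Spec_intersect1 nums1 nums2 out) := by unfold Spec_intersect1; infer_instance

-- ===== CLAIM (what is proved, stated in full; the proofs are below) =====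
def Claim_equal_intersect1 : Prop := ∀ (nums1 : List Int) (nums2 : List Int), Dom_intersect1 nums1 nums2 → Spec_intersect1 nums1 nums2 (intersect1 nums1 nums2)

-- ===== LEMMAS AND PROOFS =====

-- proof-side intermediate: remove-first-occurrence intersection over plain lists
def loopE : List Int → List Int → List Int
  | [], _ => []
  | x :: a, pool =>
      if x ∈ pool then x :: loopE a (pool.erase x) else loopE a pool

lemma loopE_drop_lt (y : Int) : ∀ (a b : List Int), (∀ z ∈ a, y < z) →
    loopE a (y :: b) = loopE a b := by
  intro a
  induction a with
  | nil => intro b _; simp [loopE]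
  | cons x a ih =>
      intro b hy
      have hyx : y < x := hy x (by simp)
      have hne : x ≠ y := by omega
      by_cases hx : x ∈ b
      · have hx' : x ∈ y :: b := by simp [hx]
        rw [loopE, if_pos hx', loopE, if_pos hx,
            List.erase_cons_tail (by simp [Ne.symm hne])]
        rw [ih (b.erase x) (fun z hz => hy z (by simp [hz]))]
      · have hx' : x ∉ y :: b := by simp [hne, hx]
        rw [loopE, if_neg hx', loopE, if_neg hx]
        exact ih b (fun z hz => hy z (by simp [hz]))

lemma loopE_nil : ∀ (a : List Int), loopE a [] = [] := by
  intro a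
  induction a with
  | nil => simp [loopE]
  | cons z a ih => simp [loopE, ih]

lemma mergeA_eq_loopE : ∀ (n : Nat) (a b : List Int), a.length + b.length ≤ n →
    a.Pairwise (· ≤ ·) → b.Pairwise (· ≤ ·) → mergeA a b = loopE a b := by
  intro n
  induction n with
  | zero =>
      intro a b hn _ _
      have ha : a = [] := by cases a <;> simp_all
      subst ha; simp [mergeA, loopE]
  | succ n ih =>
      intro a b hn hpa hpb
      match a, b with
      | [], b => simp [mergeA, loopE]
      | x :: a, [] =>
          simp [mergeA, loopE, loopE_nil]
      | x :: a, y :: b =>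
          have hpa' := (List.pairwise_cons.mp hpa).2
          have hpb' := (List.pairwise_cons.mp hpb).2
          simp only [List.length_cons] at hn
          by_cases h1 : x < y
          · have hnm : x ∉ y :: b := by
              intro hx
              rcases List.mem_cons.mp hx with h | h
              · omega
              · have := (List.pairwise_cons.mp hpb).1 x h; omega
            rw [mergeA, if_pos h1, loopE, if_neg hnm]
            exact ih a (y :: b) (by simp; omega) hpa' hpb
          · by_cases h2 : y < x
            · have hdrop : loopE (x :: a) (y :: b) = loopE (x :: a) b := by
                apply loopE_drop_lt
                intro z hz
                rcases List.mem_cons.mp hz with h | h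
                · omega
                · have := (List.pairwise_cons.mp hpa).1 z h; omega
              rw [mergeA, if_neg h1, if_pos h2, hdrop]
              exact ih (x :: a) b (by simp; omega) hpa hpb'
            · have hxy : x = y := by omega
              subst hxy
              rw [mergeA, if_neg h1, if_neg h2, loopE,
                  if_pos (List.mem_cons_self ..), List.erase_cons_head]
              rw [ih a b (by omega) hpa' hpb']

-- the counter loop agrees with the remove-first loop whenever the dict carries b's counts
lemma loopC_eq_loopE : ∀ (a b : List Int) (pool : PySem.Dict Int Int),
    (∀ x, pool.getD x 0 = (b.count x : Int)) → loopC a pool = loopE a b := by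
  intro a
  induction a with
  | nil => intro b pool _; simp [loopC, loopE]
  | cons x a ih =>
      intro b pool h
      by_cases hp : pool.getD x 0 > 0
      · have hcx : 0 < b.count x := by have := h x; omega
        have hxb : x ∈ b := List.count_pos_iff.mp hcx
        rw [loopC, if_pos hp, loopE, if_pos hxb]
        congr 1
        apply ih
        intro z
        rw [PySem.Dict.getD_insert]
        by_cases hz : z = x
        · subst hz
          rw [if_pos rfl, h z, List.count_erase_self]
          have : 1 ≤ b.count z := hcx
          push_cast [Nat.cast_sub this]
          ring
        · rw [if_neg hz, h z, List.count_erase_of_ne hz]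
      · have hcx : b.count x = 0 := by have := h x; omega
        have hxb : x ∉ b := by
          intro hx
          have := List.count_pos_iff.mpr hx
          omega
        rw [loopC, if_neg hp, loopE, if_neg hxb]
        exact ih b pool h

-- ===== VERDICT (by name: the statement is the Claim_ definition above) =====
theorem intersect1_spec : Claim_equal_intersect1 := by
  intro nums1 nums2 _
  unfold Spec_intersect1 intersect1 intersect1_alt
  rw [loopC_eq_loopE _ (PySem.List.sorted nums2 (fun x => x) false) _
      (by
        intro x
        rw [← PySem.Dict.counter_eq_foldl]
        exact PySem.Dict.getD_counter ..)]
  exact mergeA_eq_loopE _ _ _ le_rfl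
    (PySem.List.sorted_pairwise ..) (PySem.List.sorted_pairwise ..)
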